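-- pv_equiv track=rewrite | github.com/Constakour/q5-automorphism-analysis | scripts/witness.py | induced_graph
-- ===== SOURCE A (Python) =====
-- m = 5
--
-- def induced_graph(mask):
--     V = [v for v in range(32) if (mask >> v) & 1]
--     idx = {v:i for i,v in enumerate(V)}
--     adj = [0]*len(V)
--     for v in V:
--         i = idx[v]
--         for b in range(m):
--             u = v ^ (1<<b)
--             j = idx.get(u, -1)
--             if j >= 0:
--                 adj[i] |= (1 << j)
--     return V, adj
-- ===== SOURCE B (Python) =====
-- m = 5
--
-- def induced_graph(mask):
--     V = [v for v in range(32) if (mask >> v) & 1]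
--     adj = []
--     for v in V:
--         row = 0
--         for j, u in enumerate(V):
--             if v ^ u in (1, 2, 4, 8, 16):
--                 row |= 1 << j
--         adj.append(row)
--     return V, adj
-- ===== Notes on version B (the rewrite author's own statement) =====
-- stated objective: simpler
-- what changed: B drops the idx dictionary and the per-vertex neighbor-enumeration-plus-lookup entirely: adjacency comes from a pairwise scan that sets bit j whenever v ^ u is a power of two (Hamming distance 1), appending each row as it is built.
import Mathlib
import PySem

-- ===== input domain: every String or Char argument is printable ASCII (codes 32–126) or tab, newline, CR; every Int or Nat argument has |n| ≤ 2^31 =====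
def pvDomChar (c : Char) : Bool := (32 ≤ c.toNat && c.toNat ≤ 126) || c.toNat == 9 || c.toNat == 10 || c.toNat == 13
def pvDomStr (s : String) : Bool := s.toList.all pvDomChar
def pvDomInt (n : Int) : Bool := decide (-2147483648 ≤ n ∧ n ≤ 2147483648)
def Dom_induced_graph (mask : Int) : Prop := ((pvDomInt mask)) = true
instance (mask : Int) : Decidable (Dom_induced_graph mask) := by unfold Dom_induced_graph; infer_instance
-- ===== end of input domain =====

-- B replaces A's idx dictionary and neighbor-enumeration-plus-lookup by a direct pairwise scan
-- (bit j of row i is set when v_i ^ v_j is a power of two); objective: simpler, not faster.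

-- ===== PORT A =====
-- 'mask >> v' is 'mask >>> v.toNat' (exact: v ≥ 0 here); '(… ) & 1' truthiness is '== 1' (the band is 0 or 1);
-- '1 << b' / '1 << j' are '(1:Int) <<< (b.toNat : Int)' (exact: b, j ≥ 0 where reached); 'idx[v]' via get?/getD (v is always a key);
-- 'adj[i]' via List.getD (i is always in range).
def induced_graph (mask : Int) : List Int × List Int :=
  let V : List Int := (PySem.List.pyRange 0 32 1).filter
    (fun v => PySem.Int.band (mask >>> v.toNat) 1 == 1)
  let idx : PySem.Dict Int Int :=
    (PySem.List.enumerate V 0).foldl (fun d p => d.insert p.2 p.1) PySem.Dict.empty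
  let adj0 : List Int := List.replicate V.length 0
  let adj := V.foldl (fun adj v =>
    let i := ((idx.get? v).getD 0)
    (PySem.List.pyRange 0 5 1).foldl (fun adj b =>
      let u := PySem.Int.bxor v ((1:Int) <<< (b.toNat : Int))
      let j := idx.getD u (-1)
      if j ≥ 0 then
        adj.set i.toNat (PySem.Int.bor (adj.getD i.toNat 0) ((1:Int) <<< (j.toNat : Int)))
      else adj) adj) adj0
  (V, adj)

-- ===== PORT B =====
-- 'v ^ u in (1, 2, 4, 8, 16)' is membership in the literal list; 'row |= 1 << j' is bor with (1:Int) <<< (j.toNat : Int) (j ≥ 0).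
def induced_graph_alt (mask : Int) : List Int × List Int :=
  let V : List Int := (PySem.List.pyRange 0 32 1).filter
    (fun v => PySem.Int.band (mask >>> v.toNat) 1 == 1)
  let adj := V.foldl (fun adj v =>
    adj ++ [(PySem.List.enumerate V 0).foldl (fun row p =>
      if ([1, 2, 4, 8, 16] : List Int).contains (PySem.Int.bxor v p.2) then
        PySem.Int.bor row ((1:Int) <<< (p.1.toNat : Int))
      else row) 0]) []
  (V, adj)

-- ===== PRECONDITION & SPEC =====
def Spec_induced_graph (mask : Int) (out : List Int × List Int) : Prop := out = induced_graph_alt mask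
instance (mask : Int) (out : List Int × List Int) : Decidable (Spec_induced_graph mask out) := by unfold Spec_induced_graph; infer_instance

-- ===== CLAIM (what is proved, stated in full; the proofs are below) =====
def Claim_equal_induced_graph : Prop := ∀ (mask : Int), Dom_induced_graph mask → Spec_induced_graph mask (induced_graph mask)

-- ===== LEMMAS AND PROOFS =====

/-- The shared vertex list `[v for v in range(32) if (mask >> v) & 1]`. -/
def pvV (mask : Int) : List Int :=
  (PySem.List.pyRange 0 32 1).filter (fun v => PySem.Int.band (mask >>> v.toNat) 1 == 1)

/-- A's index dictionary `{v: i for i, v in enumerate(V)}`. -/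
def pvIdx (V : List Int) : PySem.Dict Int Int :=
  (PySem.List.enumerate V 0).foldl (fun d p => d.insert p.2 p.1) PySem.Dict.empty

/-- A's inner loop over `b in range(5)`, acting on the single accumulator cell. -/
def pvRowA (V : List Int) (v : Int) (a : Int) : Int :=
  (PySem.List.pyRange 0 5 1).foldl (fun a b =>
    let u := PySem.Int.bxor v ((1:Int) <<< (b.toNat : Int))
    let j := (pvIdx V).getD u (-1)
    if j ≥ 0 then PySem.Int.bor a ((1:Int) <<< (j.toNat : Int)) else a) a

/-- B's row: pairwise scan over `enumerate(V)`. -/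
def pvRowB (V : List Int) (v : Int) : Int :=
  (PySem.List.enumerate V 0).foldl (fun row p =>
    if ([1, 2, 4, 8, 16] : List Int).contains (PySem.Int.bxor v p.2) then
      PySem.Int.bor row ((1:Int) <<< (p.1.toNat : Int))
    else row) 0

/-- A's outer-loop step. -/
def pvStepA (V : List Int) (adj : List Int) (v : Int) : List Int :=
  let i := (((pvIdx V).get? v).getD 0)
  (PySem.List.pyRange 0 5 1).foldl (fun adj b =>
    let u := PySem.Int.bxor v ((1:Int) <<< (b.toNat : Int))
    let j := (pvIdx V).getD u (-1)
    if j ≥ 0 then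
      adj.set i.toNat (PySem.Int.bor (adj.getD i.toNat 0) ((1:Int) <<< (j.toNat : Int)))
    else adj) adj

lemma pvV_mem_bounds (mask : Int) : ∀ v ∈ pvV mask, 0 ≤ v ∧ v < 32 := by
  intro v hv
  have h := (List.mem_filter.1 hv).1
  exact (PySem.List.mem_pyRange_one.1 h)

lemma pvV_nodup (mask : Int) : (pvV mask).Nodup :=
  (PySem.List.nodup_pyRange_one 0 32).filter _

lemma pvIdx_items (V : List Int) (h : V.Nodup) :
    (pvIdx V).items = (PySem.List.enumerate V 0).map (fun p => (p.2, p.1)) := by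
  have h1 : ∀ a ∈ PySem.List.enumerate V 0, (PySem.Dict.empty : PySem.Dict Int Int).contains a.2 = false := by
    intro a _; simp
  have h2 : ((PySem.List.enumerate V 0).map (fun p => p.2)).Nodup := by
    rw [PySem.List.map_snd_enumerate]; exact h
  have := PySem.Dict.items_foldl_insert_fresh (PySem.List.enumerate V 0)
    (fun p => p.2) (fun p => p.1) PySem.Dict.empty h1 h2
  simpa [pvIdx] using this

lemma pvIdx_keys (V : List Int) (h : V.Nodup) : (pvIdx V).keys = V := by
  have hi := pvIdx_items V h
  simp only [PySem.Dict.keys, hi, List.map_map, Function.comp_def]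
  exact PySem.List.map_snd_enumerate V 0

lemma pvIdx_get? (V : List Int) (h : V.Nodup) (u : Int) :
    (pvIdx V).get? u = if u ∈ V then some ((V.idxOf u : Nat) : Int) else none := by
  have hknd : (pvIdx V).keys.Nodup := by rw [pvIdx_keys V h]; exact h
  by_cases hu : u ∈ V
  · rw [if_pos hu]
    have ht : V.idxOf u < V.length := List.idxOf_lt_length_of_mem hu
    have hmem : (u, ((V.idxOf u : Nat) : Int)) ∈ (pvIdx V).items := by
      rw [pvIdx_items V h]
      refine List.mem_map.2 ⟨(((V.idxOf u : Nat) : Int), V[V.idxOf u]'(List.idxOf_lt_length_of_mem hu)), ?_, ?_⟩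
      · rw [PySem.List.mem_enumerate_iff]
        exact ⟨V.idxOf u, ht, by simp⟩
      · simp [List.getElem_idxOf ht]
    exact PySem.Dict.get?_of_mem_items _ hmem hknd
  · rw [if_neg hu]
    rw [PySem.Dict.get?_eq_none_iff_not_mem_keys, pvIdx_keys V h]
    exact hu

lemma pvIdx_getD (V : List Int) (h : V.Nodup) (u : Int) :
    (pvIdx V).getD u (-1) = if u ∈ V then ((V.idxOf u : Nat) : Int) else -1 := by
  rw [PySem.Dict.getD_eq_get?_getD, pvIdx_get? V h u]
  split <;> rfl

lemma orFold_testBit (es : List Nat) (a : Nat) (t : Nat) :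
    (es.foldl (fun x e => x ||| 2 ^ e) a).testBit t = (a.testBit t || decide (t ∈ es)) := by
  induction es generalizing a with
  | nil => simp
  | cons e es ih =>
    rw [List.foldl_cons, ih]
    by_cases he : e = t
    · subst he; simp [Nat.testBit_or]
    · have ht : ¬ t = e := fun hh => he hh.symm
      simp [Nat.testBit_or, he, ht]

lemma orFold_int (es : List Nat) (a : Nat) :
    es.foldl (fun (x : Int) (e : Nat) => PySem.Int.bor x ((1:Int) <<< (e : Int))) ((a : Nat) : Int)
      = ((es.foldl (fun x e => x ||| 2 ^ e) a : Nat) : Int) := by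
  induction es generalizing a with
  | nil => simp
  | cons e es ih =>
    have h1 : ((1:Int) <<< ((e : Nat) : Int)) = ((2 ^ e : Nat) : Int) := Int.one_shiftLeft e
    rw [List.foldl_cons, List.foldl_cons, h1, PySem.Int.bor_natCast]
    exact ih (a ||| 2 ^ e)

lemma bxor_cancel (v x : Int) (hv : 0 ≤ v) (hx : 0 ≤ x) :
    PySem.Int.bxor v (PySem.Int.bxor v x) = x := by
  rw [PySem.Int.bxor_of_nonneg hv hx, PySem.Int.bxor_of_nonneg hv (by positivity)]
  simp [Nat.xor_xor_cancel_left, Int.toNat_of_nonneg hx]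

lemma foldl_set_or (es : List Int) (cond : Int → Prop) [DecidablePred cond]
    (op : Int → Int → Int) (k : Nat) :
    ∀ (adj : List Int), k < adj.length →
      es.foldl (fun adj b => if cond b then adj.set k (op (adj.getD k 0) b) else adj) adj
        = adj.set k (es.foldl (fun a b => if cond b then op a b else a) (adj.getD k 0)) := by
  induction es with
  | nil =>
    intro adj hk
    rw [List.foldl_nil, List.foldl_nil, List.getD_eq_getElem _ _ hk, List.set_getElem_self]
  | cons e es ih =>
    intro adj hk
    by_cases hc : cond e
    · simp only [List.foldl_cons, hc, if_true]
      rw [ih (adj.set k (op (adj.getD k 0) e)) (by simpa using hk)]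
      rw [List.set_set]
      congr 1
      rw [List.getD_eq_getElem _ _ (by simpa using hk), List.getElem_set_self (by simpa using hk)]
    · simp only [List.foldl_cons, hc, if_false]
      exact ih adj hk

lemma pvStepA_eq (mask : Int) (adj : List Int) (v : Int) (hv : v ∈ pvV mask)
    (hlen : adj.length = (pvV mask).length) :
    pvStepA (pvV mask) adj v
      = adj.set ((pvV mask).idxOf v)
          (pvRowA (pvV mask) v (adj.getD ((pvV mask).idxOf v) 0)) := by
  have hnd := pvV_nodup mask
  have hi : (((pvIdx (pvV mask)).get? v).getD 0) = (((pvV mask).idxOf v : Nat) : Int) := by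
    rw [pvIdx_get? _ hnd v, if_pos hv]; rfl
  have hk : (pvV mask).idxOf v < adj.length := by
    rw [hlen]; exact List.idxOf_lt_length_of_mem hv
  simp only [pvStepA, hi, Int.toNat_natCast]
  exact foldl_set_or (PySem.List.pyRange 0 5 1)
    (fun b => (pvIdx (pvV mask)).getD (PySem.Int.bxor v ((1:Int) <<< (b.toNat : Int))) (-1) ≥ 0)
    (fun a b => PySem.Int.bor a
      ((1:Int) <<< (((pvIdx (pvV mask)).getD (PySem.Int.bxor v ((1:Int) <<< (b.toNat : Int))) (-1)).toNat : Int)))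
    ((pvV mask).idxOf v) adj hk

lemma foldl_rows (V : List Int) (hV : V.Nodup) (g : Int → Int → Int)
    (s : List Int → Int → List Int)
    (hs : ∀ adj v, v ∈ V → adj.length = V.length →
      s adj v = adj.set (V.idxOf v) (g v (adj.getD (V.idxOf v) 0))) :
    ∀ (L : List Int), (∀ x ∈ L, x ∈ V) → L.Nodup →
    ∀ (adj : List Int), adj.length = V.length →
      (L.foldl s adj).length = V.length ∧
      ∀ k (hk : k < V.length),
        (L.foldl s adj).getD k 0
          = if V[k] ∈ L then g V[k] (adj.getD k 0) else adj.getD k 0 := by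
  intro L
  induction L with
  | nil =>
    intro _ _ adj hlen
    exact ⟨hlen, fun k hk => by simp⟩
  | cons v rest ih =>
    intro hsub hnodup adj hlen
    have hvV : v ∈ V := hsub v (List.mem_cons_self)
    have hvnotr : v ∉ rest := (List.nodup_cons.1 hnodup).1
    have hiv : V.idxOf v < V.length := List.idxOf_lt_length_of_mem hvV
    have hgetv : V[V.idxOf v] = v := List.getElem_idxOf hiv
    rw [List.foldl_cons, hs adj v hvV hlen]
    have hlen' : (adj.set (V.idxOf v) (g v (adj.getD (V.idxOf v) 0))).length = V.length := by
      simp [hlen]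
    have hrest := ih (fun x hx => hsub x (List.mem_cons_of_mem _ hx))
      (List.nodup_cons.1 hnodup).2 (adj.set (V.idxOf v) (g v (adj.getD (V.idxOf v) 0))) hlen'
    refine ⟨hrest.1, ?_⟩
    intro k hk
    have hka : k < adj.length := by rw [hlen]; exact hk
    have hka' : k < (adj.set (V.idxOf v) (g v (adj.getD (V.idxOf v) 0))).length := by
      rw [hlen']; exact hk
    have hadjk : (adj.set (V.idxOf v) (g v (adj.getD (V.idxOf v) 0))).getD k 0
        = if V.idxOf v = k then g v (adj.getD k 0) else adj.getD k 0 := by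
      by_cases hik : V.idxOf v = k
      · rw [if_pos hik, List.getD_eq_getElem _ _ hka']
        subst hik
        exact List.getElem_set_self (by simpa using hka)
      · rw [if_neg hik, List.getD_eq_getElem _ _ hka',
          List.getElem_set_ne hik (by simpa using hka), List.getD_eq_getElem _ _ hka]
    rw [hrest.2 k hk]
    by_cases hmem : V[k] ∈ rest
    · have hik : V.idxOf v ≠ k := by
        intro hh
        subst hh
        exact hvnotr (hgetv ▸ hmem)
      rw [if_pos hmem, if_pos (List.mem_cons_of_mem _ hmem), hadjk, if_neg hik]
    · rw [if_neg hmem]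
      by_cases hik : V.idxOf v = k
      · subst hik
        rw [if_pos (by rw [hgetv]; exact List.mem_cons_self), hadjk, if_pos rfl, hgetv]
      · have hvk : V[k] ≠ v := by
          intro hh
          exact hik (by rw [← hh]; exact hV.idxOf_getElem k hk)
        rw [hadjk, if_neg hik, if_neg (by simp [List.mem_cons, hvk, hmem])]

lemma orFold_int0 (es : List Nat) :
    es.foldl (fun (x : Int) (e : Nat) => PySem.Int.bor x ((1:Int) <<< (e : Int))) (0 : Int)
      = ((es.foldl (fun x e => x ||| 2 ^ e) 0 : Nat) : Int) := by
  simpa using orFold_int es 0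

lemma row_eq (mask : Int) (v : Int) (hv : v ∈ pvV mask) :
    pvRowA (pvV mask) v 0 = pvRowB (pvV mask) v := by
  have hnd := pvV_nodup mask
  have hb := pvV_mem_bounds mask
  have hv0 : 0 ≤ v := (hb v hv).1
  have h5 : PySem.List.pyRange 0 5 1 = [0, 1, 2, 3, 4] := by decide
  -- A's row as an or-fold over its exponent list
  have hcong : ∀ (acc : Int), ∀ b ∈ PySem.List.pyRange 0 5 1,
      (fun (a : Int) (b : Int) =>
        let u := PySem.Int.bxor v ((1:Int) <<< (b.toNat : Int))
        let j := (pvIdx (pvV mask)).getD u (-1)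
        if j ≥ 0 then PySem.Int.bor a ((1:Int) <<< (j.toNat : Int)) else a) acc b
      = (fun (a : Int) (b : Int) =>
          if PySem.Int.bxor v ((1:Int) <<< (b.toNat : Int)) ∈ pvV mask then
            PySem.Int.bor a
              ((1:Int) <<< (((pvV mask).idxOf (PySem.Int.bxor v ((1:Int) <<< (b.toNat : Int))) : Nat) : Int))
          else a) acc b := by
    intro acc b _
    simp only [pvIdx_getD _ hnd]
    by_cases hu : PySem.Int.bxor v ((1:Int) <<< (b.toNat : Int)) ∈ pvV mask
    · simp only [if_pos hu, Int.toNat_natCast]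
      rw [if_pos (by positivity :
        ((((pvV mask).idxOf (PySem.Int.bxor v ((1:Int) <<< (b.toNat : Int))) : Nat) : Int)) ≥ 0)]
    · simp only [if_neg hu]
      rw [if_neg (by decide : ¬ ((-1 : Int) ≥ 0))]
  have hA : pvRowA (pvV mask) v 0
      = ((((PySem.List.pyRange 0 5 1).filter
            (fun b => decide (PySem.Int.bxor v ((1:Int) <<< (b.toNat : Int)) ∈ pvV mask))).map
            (fun b => (pvV mask).idxOf (PySem.Int.bxor v ((1:Int) <<< (b.toNat : Int))))).foldl
          (fun (x : Int) (e : Nat) => PySem.Int.bor x ((1:Int) <<< (e : Int))) (0 : Int)) :=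
    (PySem.List.foldl_congr_mem _ _ _ _ hcong).trans
      ((PySem.List.foldl_ite_eq_foldl_filter
          (fun b => PySem.Int.bxor v ((1:Int) <<< (b.toNat : Int)) ∈ pvV mask)
          (fun (a : Int) (b : Int) =>
            PySem.Int.bor a
              ((1:Int) <<< (((pvV mask).idxOf (PySem.Int.bxor v ((1:Int) <<< (b.toNat : Int))) : Nat) : Int)))
          _ 0).trans
        (List.foldl_map
          (f := fun (b : Int) => ((pvV mask).idxOf (PySem.Int.bxor v ((1:Int) <<< (b.toNat : Int))) : Nat))
          (g := fun (x : Int) (e : Nat) => PySem.Int.bor x ((1:Int) <<< (e : Int)))).symm)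
  have hB : pvRowB (pvV mask) v
      = ((((PySem.List.enumerate (pvV mask) 0).filter
            (fun p => ([1, 2, 4, 8, 16] : List Int).contains (PySem.Int.bxor v p.2))).map
            (fun p => p.1.toNat)).foldl
          (fun (x : Int) (e : Nat) => PySem.Int.bor x ((1:Int) <<< (e : Int))) (0 : Int)) := by
    unfold pvRowB
    exact (PySem.List.foldl_if_eq_foldl_filter
        (fun p => ([1, 2, 4, 8, 16] : List Int).contains (PySem.Int.bxor v p.2))
        (fun (row : Int) (p : Int × Int) => PySem.Int.bor row ((1:Int) <<< (p.1.toNat : Int)))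
        _ 0).trans
      (List.foldl_map
        (f := fun (p : Int × Int) => p.1.toNat)
        (g := fun (x : Int) (e : Nat) => PySem.Int.bor x ((1:Int) <<< (e : Int)))).symm
  rw [hA, hB, orFold_int0, orFold_int0]
  congr 1
  apply Nat.eq_of_testBit_eq
  intro t
  rw [orFold_testBit, orFold_testBit]
  simp only [Nat.zero_testBit, Bool.false_or]
  rw [decide_eq_decide]
  constructor
  · intro h
    obtain ⟨b, hbf, rfl⟩ := List.mem_map.1 h
    obtain ⟨hb5, hq⟩ := List.mem_filter.1 hbf
    have hmem : PySem.Int.bxor v ((1:Int) <<< (b.toNat : Int)) ∈ pvV mask :=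
      of_decide_eq_true hq
    have hbcase : b = 0 ∨ b = 1 ∨ b = 2 ∨ b = 3 ∨ b = 4 := by
      rw [h5] at hb5; simpa using hb5
    have hx : ((1:Int) <<< (b.toNat : Int)) ∈ ([1, 2, 4, 8, 16] : List Int)
        ∧ 0 ≤ ((1:Int) <<< (b.toNat : Int)) := by
      rcases hbcase with rfl | rfl | rfl | rfl | rfl <;> exact ⟨by decide, by decide⟩
    have ht : (pvV mask).idxOf (PySem.Int.bxor v ((1:Int) <<< (b.toNat : Int))) < (pvV mask).length :=
      List.idxOf_lt_length_of_mem hmem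
    apply List.mem_map.2
    refine ⟨((((pvV mask).idxOf (PySem.Int.bxor v ((1:Int) <<< (b.toNat : Int))) : Nat) : Int),
      (pvV mask)[(pvV mask).idxOf (PySem.Int.bxor v ((1:Int) <<< (b.toNat : Int)))]'ht),
      List.mem_filter.2 ⟨?_, ?_⟩, by simp⟩
    · exact (PySem.List.mem_enumerate_iff _ _ _).2
        ⟨(pvV mask).idxOf (PySem.Int.bxor v ((1:Int) <<< (b.toNat : Int))), ht, by simp⟩
    · rw [List.contains_iff_mem]
      rw [List.getElem_idxOf ht, bxor_cancel v _ hv0 hx.2]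
      exact hx.1
  · intro h
    obtain ⟨p, hpf, htp⟩ := List.mem_map.1 h
    obtain ⟨hpe, hpc⟩ := List.mem_filter.1 hpf
    obtain ⟨k, hk, rfl⟩ := (PySem.List.mem_enumerate_iff _ _ _).1 hpe
    have hxk : PySem.Int.bxor v ((pvV mask)[k]'hk) ∈ ([1, 2, 4, 8, 16] : List Int) := by
      rw [← List.contains_iff_mem]; exact hpc
    have hVk := hb ((pvV mask)[k]'hk) (List.getElem_mem hk)
    obtain ⟨b, hbl, hbx⟩ : ∃ b ∈ ([0, 1, 2, 3, 4] : List Int),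
        (1:Int) <<< (b.toNat : Int) = PySem.Int.bxor v ((pvV mask)[k]'hk) := by
      simp only [List.mem_cons, List.not_mem_nil, or_false] at hxk
      rcases hxk with hc | hc | hc | hc | hc
      · exact ⟨0, by decide, by rw [hc]; decide⟩
      · exact ⟨1, by decide, by rw [hc]; decide⟩
      · exact ⟨2, by decide, by rw [hc]; decide⟩
      · exact ⟨3, by decide, by rw [hc]; decide⟩
      · exact ⟨4, by decide, by rw [hc]; decide⟩
    have hub : PySem.Int.bxor v ((1:Int) <<< (b.toNat : Int)) = (pvV mask)[k]'hk := by
      rw [hbx]; exact bxor_cancel v _ hv0 hVk.1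
    have htk : t = k := by simpa using htp.symm
    apply List.mem_map.2
    refine ⟨b, List.mem_filter.2 ⟨by rw [h5]; exact hbl, ?_⟩, ?_⟩
    · exact decide_eq_true (by rw [hub]; exact List.getElem_mem hk)
    · rw [hub, hnd.idxOf_getElem k hk, htk]

-- ===== VERDICT (by name: the statement is the Claim_ definition above) =====
theorem induced_graph_spec : Claim_equal_induced_graph := by
  intro mask _
  unfold Spec_induced_graph
  have hA : induced_graph mask
      = (pvV mask, (pvV mask).foldl (pvStepA (pvV mask))
          (List.replicate (pvV mask).length 0)) := rfl
  have hB : induced_graph_alt mask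
      = (pvV mask, (pvV mask).foldl (fun adj v => adj ++ [pvRowB (pvV mask) v]) []) := rfl
  rw [hA, hB, PySem.List.foldl_append_singleton_eq_map]
  have hmain := foldl_rows (pvV mask) (pvV_nodup mask)
      (fun v a => pvRowA (pvV mask) v a) (pvStepA (pvV mask))
      (fun adj v hv hlen => pvStepA_eq mask adj v hv hlen)
      (pvV mask) (fun x hx => hx) (pvV_nodup mask)
      (List.replicate (pvV mask).length 0) (by simp)
  refine Prod.ext rfl ?_
  simp only [List.nil_append]
  apply List.ext_getElem
  · rw [hmain.1]; simp
  · intro k hk1 hk2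
    have hkV : k < (pvV mask).length := by rw [hmain.1] at hk1; exact hk1
    have h2 := hmain.2 k hkV
    rw [if_pos (List.getElem_mem hkV)] at h2
    rw [← List.getD_eq_getElem _ 0 hk1, h2]
    have hrep : (List.replicate (pvV mask).length (0:Int)).getD k 0 = 0 :=
      List.getD_replicate _ hkV
    simp only [hrep]
    rw [row_eq mask _ (List.getElem_mem hkV)]
    simp [List.getElem_map]
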